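-- pv_equiv track=rewrite | github.com/disputestrike/RELEASE-CRUCIB-2026 | backend/orchestration/final_assembly_agent.py | _detect_entrypoint
-- ===== SOURCE A (Python) =====
-- def _detect_entrypoint(files):
--     candidates = ["main.py", "index.js", "index.tsx", "App.jsx", "App.tsx"]
--     file_paths = [f.get("path", "") for f in files] if files else []
--     for candidate in candidates:
--         for path in file_paths:
--             if path.endswith(candidate):
--                 return path
--     return file_paths[0] if file_paths else "unknown"
-- ===== SOURCE B (Python) =====
-- def _detect_entrypoint(files):
--     candidates = ["main.py", "index.js", "index.tsx", "App.jsx", "App.tsx"]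
--     file_paths = [f.get("path", "") for f in files] if files else []
--     best = {}
--     for path in file_paths:
--         for cand in candidates:
--             if cand not in best and path.endswith(cand):
--                 best[cand] = path
--     for cand in candidates:
--         if cand in best:
--             return best[cand]
--     return file_paths[0] if file_paths else "unknown"
-- ===== Notes on version B (the rewrite author's own statement) =====
-- stated objective: alternative
-- what changed: One pass over the paths builds a dict mapping each candidate suffix to the first path ending with it, then the candidates are consulted once in priority order, instead of rescanning the whole path list for every candidate.
import Mathlib
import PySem

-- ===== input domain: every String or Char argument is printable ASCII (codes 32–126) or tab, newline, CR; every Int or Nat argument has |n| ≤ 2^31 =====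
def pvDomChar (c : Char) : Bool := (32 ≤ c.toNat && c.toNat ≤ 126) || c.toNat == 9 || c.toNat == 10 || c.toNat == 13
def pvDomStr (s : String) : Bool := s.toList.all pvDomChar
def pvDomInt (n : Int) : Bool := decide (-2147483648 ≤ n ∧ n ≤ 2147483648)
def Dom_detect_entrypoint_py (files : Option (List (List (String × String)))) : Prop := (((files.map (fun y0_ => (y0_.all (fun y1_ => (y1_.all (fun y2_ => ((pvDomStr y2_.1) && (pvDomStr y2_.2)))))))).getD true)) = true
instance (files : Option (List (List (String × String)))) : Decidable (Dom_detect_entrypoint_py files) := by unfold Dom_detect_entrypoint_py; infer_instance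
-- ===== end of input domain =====

-- B builds a dict index (candidate suffix → first matching path) in one pass over the paths,
-- then looks the candidates up once in priority order; A rescans the path list per candidate.

def pvCandidates : List String := ["main.py", "index.js", "index.tsx", "App.jsx", "App.tsx"]

-- shared fallback: file_paths[0] if file_paths else "unknown"
def pvFallback (ps : List String) : String :=
  match ps with
  | p :: _ => p
  | [] => "unknown"

-- ===== PORT A =====
-- A's outer loop over candidates; the inner 'for path … return path' is List.find?.
def pvAFind (cands : List String) (ps : List String) : Option String :=
  match cands with
  | [] => none
  | c :: cs =>
    match ps.find? (fun p => PySem.Str.endswith p c) with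
    | some p => some p
    | none => pvAFind cs ps

def detect_entrypoint_py (files : Option (List (List (String × String)))) : String :=
  let file_paths : List String :=
    match files with
    | some fs => fs.map (fun f => PySem.Dict.getD (PySem.Dict.mk f) "path" "")
    | none => []
  match pvAFind pvCandidates file_paths with
  | some p => p
  | none => pvFallback file_paths

-- ===== PORT B =====
-- inner 'for cand in candidates: if cand not in best and path.endswith(cand): best[cand] = path'
def pvBStep (d : PySem.Dict String String) (path : String) : PySem.Dict String String :=
  pvCandidates.foldl
    (fun d cand =>
      if !(d.contains cand) && PySem.Str.endswith path cand then d.insert cand path else d) d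

-- final 'for cand in candidates: if cand in best: return best[cand]' + fallback
def pvBLookup (cands : List String) (best : PySem.Dict String String) (ps : List String) : String :=
  match cands with
  | [] => pvFallback ps
  | c :: cs =>
    match best.get? c with
    | some p => p
    | none => pvBLookup cs best ps

def detect_entrypoint_py_alt (files : Option (List (List (String × String)))) : String :=
  let file_paths : List String :=
    match files with
    | some fs => fs.map (fun f => PySem.Dict.getD (PySem.Dict.mk f) "path" "")
    | none => []
  let best := file_paths.foldl pvBStep PySem.Dict.empty
  pvBLookup pvCandidates best file_paths

-- ===== PRECONDITION & SPEC =====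
def Spec_detect_entrypoint_py (files : Option (List (List (String × String)))) (out : String) : Prop := out = detect_entrypoint_py_alt files
instance (files : Option (List (List (String × String)))) (out : String) : Decidable (Spec_detect_entrypoint_py files out) := by unfold Spec_detect_entrypoint_py; infer_instance

-- ===== CLAIM (what is proved, stated in full; the proofs are below) =====
def Claim_equal_detect_entrypoint_py : Prop := ∀ (files : Option (List (List (String × String)))), Dom_detect_entrypoint_py files → Spec_detect_entrypoint_py files (detect_entrypoint_py files)

-- ===== LEMMAS AND PROOFS =====

-- effect of B's inner candidate loop on one key
theorem pvBStep_get? (path c : String) (cands : List String) (d : PySem.Dict String String) :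
    (cands.foldl
      (fun d cand =>
        if !(d.contains cand) && PySem.Str.endswith path cand then d.insert cand path else d)
      d).get? c
    = (d.get? c).or
        (if c ∈ cands ∧ PySem.Str.endswith path c = true then some path else none) := by
  induction cands generalizing d with
  | nil => simp
  | cons a cs ih =>
    simp only [List.foldl_cons]
    rw [ih]
    by_cases hca : c = a
    · subst hca
      by_cases he : PySem.Str.endswith path c = true
      · simp only [PySem.Str.endswith_eq] at he
        rcases hget : d.get? c with _ | v
        · have hcont : d.contains c = false := by
            rw [PySem.Dict.contains_eq_isSome_get?, hget]; rfl
          simp [hcont, he, PySem.Dict.get?_insert_self, Option.or]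
        · have hcont : d.contains c = true := by
            rw [PySem.Dict.contains_eq_isSome_get?, hget]; rfl
          simp [hcont, he, hget, Option.or]
      · simp only [PySem.Str.endswith_eq, Bool.not_eq_true] at he
        simp [he, Option.or]
    · have hne : c ≠ a := hca
      have hE : (if c ∈ a :: cs ∧ PySem.Str.endswith path c = true then some path else none)
          = (if c ∈ cs ∧ PySem.Str.endswith path c = true then some path else none) := by
        simp [hne]
      rw [hE]
      congr 1
      split_ifs with h
      · exact PySem.Dict.get?_insert_of_ne _ _ hne
      · rfl

-- effect of B's path loop on a candidate key: the dict holds the FIRST matching path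
theorem pvBFold_get? (c : String) (hc : c ∈ pvCandidates) (ps : List String)
    (d : PySem.Dict String String) :
    (ps.foldl pvBStep d).get? c
    = (d.get? c).or (ps.find? (fun p => PySem.Str.endswith p c)) := by
  induction ps generalizing d with
  | nil => simp
  | cons p ps' ih =>
    simp only [List.foldl_cons]
    rw [ih, pvBStep, pvBStep_get? p c pvCandidates d]
    by_cases he : PySem.Str.endswith p c = true
    · rw [if_pos ⟨hc, he⟩]
      simp only [List.find?_cons, he]
      cases d.get? c <;> rfl
    · have he' : PySem.Str.endswith p c = false := by
        cases h : PySem.Str.endswith p c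
        · rfl
        · exact absurd h he
      rw [if_neg (fun hAnd => he hAnd.2), Option.or_none]
      simp only [List.find?_cons, he']

-- the priority lookup over the index equals A's candidate loop (plus the shared fallback)
theorem pvBLookup_eq (ps : List String) (best : PySem.Dict String String)
    (cands : List String)
    (h : ∀ c ∈ cands, best.get? c = ps.find? (fun p => PySem.Str.endswith p c)) :
    pvBLookup cands best ps
    = match pvAFind cands ps with
      | some p => p
      | none => pvFallback ps := by
  induction cands with
  | nil => rfl
  | cons c cs ih =>
    have hc := h c (by simp)
    rw [pvBLookup, pvAFind, hc]
    cases ps.find? (fun p => PySem.Str.endswith p c) with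
    | some p => rfl
    | none => exact ih (fun c' hc' => h c' (by simp [hc']))

-- ===== VERDICT (by name: the statement is the Claim_ definition above) =====
theorem detect_entrypoint_py_spec : Claim_equal_detect_entrypoint_py := by
  intro files _
  unfold Spec_detect_entrypoint_py detect_entrypoint_py detect_entrypoint_py_alt
  cases files with
  | none =>
    simp only
    rw [pvBLookup_eq [] (List.foldl pvBStep PySem.Dict.empty []) pvCandidates
      (fun c hc => by rw [pvBFold_get? c hc]; simp)]
  | some fs =>
    simp only
    set ps := fs.map (fun f => PySem.Dict.getD (PySem.Dict.mk f) "path" "") with hps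
    rw [pvBLookup_eq ps (List.foldl pvBStep PySem.Dict.empty ps) pvCandidates
      (fun c hc => by rw [pvBFold_get? c hc ps]; simp)]
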